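-- pv_equiv track=rewrite | github.com/dev641/pdfOps | backend/services/reporters/report_lab.py | find_max_word_length_row_index
-- ===== SOURCE A (Python) =====
-- def find_max_word_length_row_index(data):
--     index = 0
--     max_str_length = 0
--     for i, row in enumerate(data):
--         for j, col in enumerate(row):
--             if isinstance(col, str) and len(col) > max_str_length:
--                 max_str_length = len(col)
--                 index = i
--     return index
-- ===== SOURCE B (Python) =====
-- def find_max_word_length_row_index(data):
--     row_max = [max((len(c) for c in row if isinstance(c, str)), default=0) for row in data]
--     return max(range(len(row_max)), key=lambda i: row_max[i], default=0)
-- ===== Notes on version B (the rewrite author's own statement) =====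
-- stated objective: alternative
-- what changed: Replaces the fused two-level cell scan with mutable index/max state by two shaped passes: a per-row length maximum (row_max) followed by a first-occurrence argmax over the row indices.
import Mathlib
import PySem

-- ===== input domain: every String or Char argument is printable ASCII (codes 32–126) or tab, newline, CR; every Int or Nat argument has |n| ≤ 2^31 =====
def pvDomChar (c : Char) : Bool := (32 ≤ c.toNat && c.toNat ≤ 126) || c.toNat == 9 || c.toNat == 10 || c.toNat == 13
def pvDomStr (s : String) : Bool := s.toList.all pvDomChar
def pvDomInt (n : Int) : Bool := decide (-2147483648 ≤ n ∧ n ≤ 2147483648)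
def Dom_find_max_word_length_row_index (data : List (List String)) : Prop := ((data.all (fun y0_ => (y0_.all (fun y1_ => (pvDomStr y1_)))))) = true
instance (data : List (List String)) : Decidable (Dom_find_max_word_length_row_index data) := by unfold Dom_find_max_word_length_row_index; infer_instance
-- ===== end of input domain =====

-- B replaces A's fused two-level scan carrying index/max state by two shaped passes
-- (per-row maximum, then first-occurrence argmax over row indices); alternative decomposition, same cost.

-- ===== PORT A =====
-- literal port of A: fused enumerate/enumerate scan with mutable (index, max_str_length);
-- `isinstance(col, str)` is identically true at type List (List String), so the guard is just the length test.
def find_max_word_length_row_index (data : List (List String)) : Int :=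
  (((PySem.List.enumerate data).foldl
      (fun (st : Int × Int) (p : Int × List String) =>
        (PySem.List.enumerate p.2).foldl
          (fun (st : Int × Int) (q : Int × String) =>
            if PySem.Str.len q.2 > st.2 then (p.1, PySem.Str.len q.2) else st)
          st)
      ((0 : Int), (0 : Int))).1)

-- ===== PORT B =====
-- literal port of B: row_max list comprehension (max with default=0), then argmax via max over range with key.
def find_max_word_length_row_index_alt (data : List (List String)) : Int :=
  let row_max : List Int :=
    data.map (fun row => PySem.List.maxD (row.map PySem.Str.len) (fun x => x) 0)
  PySem.List.maxD (PySem.List.pyRange 0 (row_max.length : Int) 1)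
    (fun i => PySem.List.pyGetD row_max i 0) 0

-- ===== PRECONDITION & SPEC =====
def Spec_find_max_word_length_row_index (data : List (List String)) (out : Int) : Prop := out = find_max_word_length_row_index_alt data
instance (data : List (List String)) (out : Int) : Decidable (Spec_find_max_word_length_row_index data out) := by unfold Spec_find_max_word_length_row_index; infer_instance

-- ===== CLAIM (what is proved, stated in full; the proofs are below) =====
def Claim_equal_find_max_word_length_row_index : Prop := ∀ (data : List (List String)), Dom_find_max_word_length_row_index data → Spec_find_max_word_length_row_index data (find_max_word_length_row_index data)

-- ===== LEMMAS AND PROOFS =====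

-- running maximum of a row's cell lengths, started from 0 (the per-row aggregate both programs compute)
def gRow (row : List String) : Int :=
  row.foldl (fun a c => max a (PySem.Str.len c)) 0

theorem gRow_nonneg (row : List String) : 0 ≤ gRow row :=
  (PySem.List.le_foldl_max_int row PySem.Str.len 0).1

-- A's inner fold over `enumerate row` ignores the inner index, so it is a fold over the row
theorem foldl_enumerate_inner (row : List String) (s i : Int) (init : Int × Int) :
    (PySem.List.enumerate row s).foldl
        (fun (st : Int × Int) (q : Int × String) =>
          if PySem.Str.len q.2 > st.2 then (i, PySem.Str.len q.2) else st) init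
      = row.foldl (fun (st : Int × Int) c =>
          if PySem.Str.len c > st.2 then (i, PySem.Str.len c) else st) init := by
  induction row generalizing s init with
  | nil => rfl
  | cons c t ih => simp only [PySem.List.enumerate_cons, List.foldl_cons, ih]

-- shifting the start of a running max
theorem foldl_max_shift (xs : List String) (a b : Int) :
    xs.foldl (fun m c => max m (PySem.Str.len c)) (max a b)
      = max a (xs.foldl (fun m c => max m (PySem.Str.len c)) b) := by
  induction xs generalizing b with
  | nil => rfl
  | cons c t ih =>
      simp only [List.foldl_cons, max_assoc]
      exact ih (max b (PySem.Str.len c))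

theorem foldl_max_from (xs : List String) (m : Int) (hm : 0 ≤ m) :
    xs.foldl (fun a c => max a (PySem.Str.len c)) m = max m (gRow xs) := by
  have h := foldl_max_shift xs m 0
  rwa [max_eq_left hm] at h

-- A's inner loop: picks up index i iff some cell beats the running max, and returns the running max
theorem innerA (row : List String) (i idx m : Int) :
    row.foldl (fun (st : Int × Int) c =>
        if PySem.Str.len c > st.2 then (i, PySem.Str.len c) else st) (idx, m)
      = (if row.foldl (fun a c => max a (PySem.Str.len c)) m > m then i else idx,
         row.foldl (fun a c => max a (PySem.Str.len c)) m) := by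
  induction row generalizing idx m with
  | nil => simp
  | cons c t ih =>
      simp only [List.foldl_cons]
      by_cases h : PySem.Str.len c > m
      · rw [if_pos h, ih]
        simp only [max_eq_right (le_of_lt h)]
        have hge : PySem.Str.len c ≤ t.foldl (fun a c => max a (PySem.Str.len c)) (PySem.Str.len c) :=
          (PySem.List.le_foldl_max_int t PySem.Str.len (PySem.Str.len c)).1
        rw [if_pos (lt_of_lt_of_le h hge)]
        split <;> rfl
      · rw [if_neg h, ih]
        simp only [max_eq_left (not_lt.mp h)]

-- A's outer loop, with the inner loop replaced by the per-row aggregate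
theorem outerA (l : List (Int × List String)) (idx m : Int) (hm : 0 ≤ m) :
    l.foldl (fun (st : Int × Int) (p : Int × List String) =>
        (PySem.List.enumerate p.2).foldl
          (fun (st : Int × Int) (q : Int × String) =>
            if PySem.Str.len q.2 > st.2 then (p.1, PySem.Str.len q.2) else st) st) (idx, m)
      = l.foldl (fun (st : Int × Int) p =>
          if st.2 < gRow p.2 then (p.1, gRow p.2) else st) (idx, m) := by
  induction l generalizing idx m with
  | nil => rfl
  | cons p t ih =>
      simp only [List.foldl_cons]
      rw [foldl_enumerate_inner, innerA, foldl_max_from _ _ hm]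
      by_cases h : m < gRow p.2
      · rw [if_pos (by omega : max m (gRow p.2) > m), if_pos h,
            max_eq_right (le_of_lt h)]
        exact ih _ _ (le_trans hm (le_of_lt h))
      · rw [if_neg (by omega : ¬ max m (gRow p.2) > m), if_neg h,
            max_eq_left (not_lt.mp h)]
        exact ih _ _ hm

-- enumerate commutes with mapping the payload
theorem enumerate_map {α β : Type} (f : α → β) (xs : List α) (s : Int) :
    PySem.List.enumerate (xs.map f) s
      = (PySem.List.enumerate xs s).map (fun p => (p.1, f p.2)) := by
  induction xs generalizing s with
  | nil => rfl
  | cons x t ih =>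
      simp only [List.map_cons, PySem.List.enumerate_cons, ih]

-- B's inner max over the row's lengths equals the running max gRow
theorem maxD_gRow (row : List String) :
    PySem.List.maxD (row.map PySem.Str.len) (fun x => x) 0 = gRow row := by
  cases row with
  | nil => rfl
  | cons c t =>
      have hlen : (0 : Int) ≤ PySem.Str.len c := by simp [PySem.Str.len]
      simp only [List.map_cons, PySem.List.maxD, PySem.List.max?_id_cons, Option.getD_some]
      rw [List.foldl_map]
      show t.foldl (fun a c => max a (PySem.Str.len c)) (PySem.Str.len c) = gRow (c :: t)
      simp only [gRow, List.foldl_cons, max_eq_right hlen]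

-- the selection step of Python's max(..., key=...): keep the first maximal element
def argStep (k : Int → Int) (acc : Option Int) (i : Int) : Option Int :=
  match acc with
  | none => some i
  | some m => if k m < k i then some i else some m

theorem max?_eq_foldl_argStep (xs : List Int) (k : Int → Int) :
    PySem.List.max? xs k = xs.foldl (argStep k) none := by
  unfold PySem.List.max?
  congr 1
  funext acc i
  cases acc <;> rfl

-- the argmax fold of B, once started, runs the same first-occurrence selection as A's pair fold
theorem argmax_char (k : Int → Int) (l : List (Int × Int))
    (h : ∀ p ∈ l, k p.1 = p.2) (bi bm : Int) (hk : k bi = bm) :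
    (l.map (·.1)).foldl (argStep k) (some bi)
      = some ((l.foldl (fun (st : Int × Int) p => if st.2 < p.2 then p else st) (bi, bm)).1) := by
  induction l generalizing bi bm with
  | nil => rfl
  | cons p t ih =>
      simp only [List.map_cons, List.foldl_cons, argStep]
      have hp : k p.1 = p.2 := h p List.mem_cons_self
      have ht : ∀ q ∈ t, k q.1 = q.2 := fun q hq => h q (List.mem_cons_of_mem _ hq)
      rw [hk, hp]
      by_cases hlt : bm < p.2
      · rw [if_pos hlt, if_pos hlt, ih ht p.1 p.2 hp]
      · rw [if_neg hlt, if_neg hlt, ih ht bi bm hk]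

-- enumerated pairs look themselves up
theorem pyGetD_enumerate (xs : List Int) (p : Int × Int) (hp : p ∈ PySem.List.enumerate xs 0) :
    PySem.List.pyGetD xs p.1 0 = p.2 := by
  rcases (PySem.List.mem_enumerate_iff xs 0 p).1 hp with ⟨j, hj, rfl⟩
  simp [PySem.List.pyGetD_natCast, List.getD_eq_getElem?_getD, hj]

-- ===== VERDICT (by name: the statement is the Claim_ definition above) =====
theorem find_max_word_length_row_index_spec : Claim_equal_find_max_word_length_row_index := by
  unfold Claim_equal_find_max_word_length_row_index
  intro data _
  unfold Spec_find_max_word_length_row_index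
  simp only [find_max_word_length_row_index, find_max_word_length_row_index_alt]
  have hmap : data.map (fun row => PySem.List.maxD (row.map PySem.Str.len) (fun x => x) 0)
      = data.map gRow := List.map_congr_left (fun row _ => maxD_gRow row)
  rw [hmap]
  cases data with
  | nil => rfl
  | cons r rs =>
      -- A side: replace the fused scan by a fold over the per-row aggregates
      rw [outerA _ 0 0 le_rfl]
      -- B side: the index range is the first components of enumerate
      have hrange : PySem.List.pyRange 0 (((r :: rs).map gRow).length : Int) 1
          = (PySem.List.enumerate ((r :: rs).map gRow) 0).map (·.1) := by
        rw [PySem.List.map_fst_enumerate]; norm_num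
      rw [hrange]
      have hall : ∀ p ∈ PySem.List.enumerate ((r :: rs).map gRow) 0,
          PySem.List.pyGetD ((r :: rs).map gRow) p.1 0 = p.2 :=
        fun p hp => pyGetD_enumerate _ p hp
      have hall2 : ∀ p ∈ PySem.List.enumerate (rs.map gRow) ((0 : Int) + 1),
          PySem.List.pyGetD (gRow r :: rs.map gRow) p.1 0 = p.2 := by
        intro p hp
        have := hall p (by
          simp only [List.map_cons, PySem.List.enumerate_cons]
          exact List.mem_cons_of_mem _ hp)
        simpa only [List.map_cons] using this
      have hk : PySem.List.pyGetD (gRow r :: rs.map gRow) 0 0 = gRow r := by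
        have := hall (0, gRow r) (by
          simp only [List.map_cons, PySem.List.enumerate_cons]
          exact List.mem_cons_self)
        simpa only [List.map_cons] using this
      simp only [PySem.List.maxD, max?_eq_foldl_argStep]
      -- peel the first enumerated index on both sides
      simp only [List.map_cons, PySem.List.enumerate_cons, List.foldl_cons, argStep]
      rw [argmax_char (fun i => PySem.List.pyGetD (gRow r :: rs.map gRow) i 0)
            (PySem.List.enumerate (rs.map gRow) ((0 : Int) + 1)) hall2 0 (gRow r) hk]
      rw [enumerate_map gRow rs ((0 : Int) + 1)]
      simp only [List.foldl_map, Option.getD_some]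
      have hinit : (if (0 : Int) < gRow r then ((0 : Int), gRow r) else ((0 : Int), (0 : Int)))
          = ((0 : Int), gRow r) := by
        rcases lt_or_eq_of_le (gRow_nonneg r) with h | h
        · rw [if_pos h]
        · rw [← h]; simp
      rw [hinit]
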